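-- pv_equiv track=rewrite | github.com/harshil1903/leetcode | Array/Ex_1769/min_operations_to_move_balls_in_each_box.py | minOperations1
-- ===== SOURCE A (Python) =====
-- from typing import List
--
-- def minOperations1(boxes: str) -> List[int]:
--     count = len(boxes)
--     result = []
--
--     for i in range(count):
--         result.append(0);
--         for j in range(count):
--             if (boxes[j] != "0"):
--                 result[-1] += abs(i - j)
--
--     return result
-- ===== SOURCE B (Python) =====
-- from typing import List
--
-- def minOperations1(boxes: str) -> List[int]:
--     # left[i]: cost of moving all non-'0' boxes at j < i to i; right analogously from the right
--     left = []
--     cnt = ops = 0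
--     for c in boxes:
--         left.append(ops)
--         cnt += c != "0"
--         ops += cnt
--     right = []
--     cnt = ops = 0
--     for c in reversed(boxes):
--         right.append(ops)
--         cnt += c != "0"
--         ops += cnt
--     right.reverse()
--     return [l + r for l, r in zip(left, right)]
-- ===== Notes on version B (the rewrite author's own statement) =====
-- stated objective: faster
-- what changed: Replaced the quadratic all-pairs distance loop by two linear prefix/suffix passes that carry a running ball count and running cost, then sum the two per index.
import Mathlib
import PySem

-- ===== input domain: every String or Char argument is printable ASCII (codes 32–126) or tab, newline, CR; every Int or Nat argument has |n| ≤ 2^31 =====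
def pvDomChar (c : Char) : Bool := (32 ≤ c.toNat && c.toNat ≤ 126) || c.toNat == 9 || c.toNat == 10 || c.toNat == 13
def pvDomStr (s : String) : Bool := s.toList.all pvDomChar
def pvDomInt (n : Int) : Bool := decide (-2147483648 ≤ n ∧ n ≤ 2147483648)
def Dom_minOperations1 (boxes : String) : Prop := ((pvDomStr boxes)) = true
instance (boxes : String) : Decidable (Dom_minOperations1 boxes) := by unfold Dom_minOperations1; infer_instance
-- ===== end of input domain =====

-- B replaces A's quadratic all-pairs distance loop by two linear prefix/suffix cost scans (measured asymptotically faster).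


-- ===== PORT A =====
-- literal port of A: for each i in range(count), append 0 and accumulate abs(i-j) over all j with boxes[j] != "0"
def minOperations1 (boxes : String) : List Int :=
  let cs := boxes.toList
  let count : Int := cs.length
  (PySem.List.pyRange 0 count 1).foldl
    (fun result i =>
      result ++ [(PySem.List.pyRange 0 count 1).foldl
        (fun acc j => if PySem.List.pyGet? cs j ≠ some '0' then acc + |i - j| else acc) 0])
    []

-- ===== PORT B =====
-- one left-to-right pass: emits the running cost `ops`, carrying the running ball count `cnt`
def pvScan : List Char → Int → Int → List Int
  | [], _, _ => []
  | c :: rest, cnt, ops =>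
    let cnt' := cnt + (if c ≠ '0' then 1 else 0)
    ops :: pvScan rest cnt' (ops + cnt')

def minOperations1_alt (boxes : String) : List Int :=
  List.zipWith (· + ·) (pvScan boxes.toList 0 0) ((pvScan boxes.toList.reverse 0 0).reverse)

-- ===== PRECONDITION & SPEC =====
def Spec_minOperations1 (boxes : String) (out : List Int) : Prop := out = minOperations1_alt boxes
instance (boxes : String) (out : List Int) : Decidable (Spec_minOperations1 boxes out) := by unfold Spec_minOperations1; infer_instance

-- ===== CLAIM (what is proved, stated in full; the proofs are below) =====
def Claim_equal_minOperations1 : Prop := ∀ (boxes : String), Dom_minOperations1 boxes → Spec_minOperations1 boxes (minOperations1 boxes)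

-- ===== LEMMAS AND PROOFS =====

-- weight of a box character: 1 if it holds a ball (anything but '0'), else 0
def pvW (c : Char) : Int := if c ≠ '0' then 1 else 0

-- prefix cost: moving every ball at position j < i to position i
def pvL (cs : List Char) (i : Nat) : Int :=
  ∑ j ∈ Finset.range i, pvW (cs.getD j '0') * ((i : Int) - (j : Int))

-- total cost as A computes it
def pvS (cs : List Char) (i : Nat) : Int :=
  ∑ j ∈ Finset.range cs.length, pvW (cs.getD j '0') * |(i : Int) - (j : Int)|

theorem pvSumRange (f : Nat → Int) (n : Nat) :
    ((List.range n).map f).sum = ∑ j ∈ Finset.range n, f j := by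
  induction n with
  | zero => simp
  | succ m ih => simp [List.range_succ, Finset.sum_range_succ, ih]

theorem pvL_cons (c : Char) (rest : List Char) (i : Nat) :
    pvL (c :: rest) (i + 1) = pvW c * ((i : Int) + 1) + pvL rest i := by
  unfold pvL
  rw [Finset.sum_range_succ']
  have h2 : (∑ j ∈ Finset.range i,
        pvW ((c :: rest).getD (j + 1) '0') * (((i + 1 : Nat) : Int) - ((j + 1 : Nat) : Int)))
      = ∑ j ∈ Finset.range i, pvW (rest.getD j '0') * ((i : Int) - (j : Int)) := by
    apply Finset.sum_congr rfl
    intro j _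
    rw [List.getD_cons_succ]
    push_cast; ring
  rw [h2, List.getD_cons_zero]
  push_cast; ring

theorem pvScan_eq (cs : List Char) (cnt ops : Int) :
    pvScan cs cnt ops =
      (List.range cs.length).map (fun i : Nat => ops + cnt * (i : Int) + pvL cs i) := by
  induction cs generalizing cnt ops with
  | nil => simp [pvScan]
  | cons c rest ih =>
    simp only [pvScan, List.length_cons, List.range_succ_eq_map, List.map_cons, List.map_map]
    rw [ih]
    congr 1
    · simp [pvL]
    · apply List.map_congr_left
      intro k hk
      simp only [Function.comp, Nat.succ_eq_add_one]
      rw [pvL_cons]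
      simp only [pvW]
      push_cast
      ring

-- A's port is the map of pvS over range n
theorem minOperations1_eq_map (boxes : String) :
    minOperations1 boxes = (List.range boxes.toList.length).map (pvS boxes.toList) := by
  unfold minOperations1
  simp only []
  rw [PySem.List.foldl_append_singleton_eq_map, List.nil_append, PySem.List.pyRange_one]
  simp only [sub_zero, Int.toNat_natCast, zero_add, List.map_map]
  apply List.map_congr_left
  intro i hi
  rw [List.mem_range] at hi
  simp only [Function.comp]
  rw [List.foldl_map]
  have hbody : (fun (acc : Int) (j : Nat) =>
        if PySem.List.pyGet? boxes.toList (j : Int) ≠ some '0' then acc + |(i : Int) - (j : Int)| else acc)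
      = (fun (acc : Int) (j : Nat) => acc +
        (if PySem.List.pyGet? boxes.toList (j : Int) ≠ some '0' then |(i : Int) - (j : Int)| else 0)) := by
    funext acc j; split <;> simp
  rw [hbody, PySem.List.foldl_add, zero_add, pvSumRange]
  unfold pvS
  apply Finset.sum_congr rfl
  intro j hj
  rw [Finset.mem_range] at hj
  rw [PySem.List.pyGet?_natCast, List.getElem?_eq_getElem hj, List.getD_eq_getElem _ _ hj]
  unfold pvW
  by_cases h : boxes.toList[j] = '0' <;> simp [h]

-- split A's total into the prefix cost and the reflected prefix cost of the reverse
theorem pvS_split (cs : List Char) (i : Nat) (hi : i < cs.length) :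
    pvS cs i = pvL cs i + pvL cs.reverse (cs.length - 1 - i) := by
  unfold pvS pvL
  set n := cs.length with hn
  have h1 : ∑ j ∈ Finset.range n, pvW (cs.getD j '0') * |(i : Int) - (j : Int)|
      = (∑ j ∈ Finset.range i, pvW (cs.getD j '0') * ((i : Int) - (j : Int)))
      + ∑ j ∈ Finset.Ico i n, pvW (cs.getD j '0') * ((j : Int) - (i : Int)) := by
    rw [Finset.range_eq_Ico, ← Finset.sum_Ico_consecutive _ (Nat.zero_le i) (Nat.le_of_lt hi)]
    congr 1
    · rw [← Finset.range_eq_Ico]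
      exact Finset.sum_congr rfl fun j hj => by
        rw [Finset.mem_range] at hj
        rw [abs_of_nonneg (by omega : (0:Int) ≤ (i : Int) - (j : Int))]
    · exact Finset.sum_congr rfl fun j hj => by
        rw [Finset.mem_Ico] at hj
        rw [abs_sub_comm, abs_of_nonneg (by omega : (0:Int) ≤ (j : Int) - (i : Int))]
  rw [h1]
  congr 1
  rw [Finset.sum_Ico_eq_sum_range]
  have hrev : ∀ k, k < n →
      pvW (cs.reverse.getD k '0') = pvW (cs.getD (n - 1 - k) '0') := by
    intro k hk
    have h2 : n - 1 - k < n := by omega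
    rw [List.getD_eq_getElem _ _ (by simpa using hk),
        List.getD_eq_getElem _ _ h2, List.getElem_reverse]
  have hlast : ∑ k ∈ Finset.range (n - 1 - i), pvW (cs.reverse.getD k '0') * (((n - 1 - i : Nat) : Int) - (k : Int))
      = ∑ k ∈ Finset.range (n - i), pvW (cs.reverse.getD k '0') * (((n - 1 - i : Nat) : Int) - (k : Int)) := by
    have he : n - i = (n - 1 - i) + 1 := by omega
    rw [he, Finset.sum_range_succ]
    simp
  rw [hlast, ← Finset.sum_range_reflect]
  apply Finset.sum_congr rfl
  intro k hk
  rw [Finset.mem_range] at hk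
  rw [hrev _ (by omega)]
  have e1 : i + (n - i - 1 - k) = n - 1 - k := by omega
  rw [e1]
  congr 1
  omega

-- ===== VERDICT (by name: the statement is the Claim_ definition above) =====
theorem minOperations1_spec : Claim_equal_minOperations1 := by
  intro boxes _
  unfold Spec_minOperations1 minOperations1_alt
  rw [minOperations1_eq_map, pvScan_eq, pvScan_eq]
  apply List.ext_getElem
  · simp
  · intro i h1 h2
    have hi : i < boxes.toList.length := by simpa using h1
    simp only [List.getElem_zipWith, List.getElem_map, List.getElem_range, List.getElem_reverse,
      List.length_reverse, List.length_map, List.length_range, List.length_reverse]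
    simp only [zero_mul, zero_add, add_zero]
    exact pvS_split boxes.toList i hi
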